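-- pv_equiv track=rewrite | github.com/JunYupK/Algorithm | 프로그래머스/unrated/138477. 명예의 전당 （1）/명예의 전당 （1）.py | solution
-- ===== SOURCE A (Python) =====
-- import heapq
--
-- def solution(k, score):
--     answer = []
--     q = []
--
--     for i in range(len(score)):
--         if i < k:
--             heapq.heappush(q, score[i])
--             answer.append(min(q))
--         else:
--             if q[0] < score[i]:
--                 heapq.heappop(q)
--                 heapq.heappush(q, score[i])
--             answer.append(min(q))
--
--
--     return answer
-- ===== SOURCE B (Python) =====
-- import bisect
--
-- def solution(k, score):
--     answer = []
--     s = []  # sorted list of every score seen so far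
--     for i, x in enumerate(score):
--         bisect.insort(s, x)  # insert keeping s sorted (at bisect_right position)
--         answer.append(s[0] if i < k else s[-k])
--     return answer
-- ===== Notes on version B (the rewrite author's own statement) =====
-- stated objective: idiomatic
-- what changed: Replaces the size-k min-heap with heappush/heappop maintenance by one sorted list of all scores kept with bisect.insort, reading each answer directly as an order statistic (s[0] while i < k, else the k-th largest s[-k]); this also removes A's per-element min(q) scan.
import Mathlib
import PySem

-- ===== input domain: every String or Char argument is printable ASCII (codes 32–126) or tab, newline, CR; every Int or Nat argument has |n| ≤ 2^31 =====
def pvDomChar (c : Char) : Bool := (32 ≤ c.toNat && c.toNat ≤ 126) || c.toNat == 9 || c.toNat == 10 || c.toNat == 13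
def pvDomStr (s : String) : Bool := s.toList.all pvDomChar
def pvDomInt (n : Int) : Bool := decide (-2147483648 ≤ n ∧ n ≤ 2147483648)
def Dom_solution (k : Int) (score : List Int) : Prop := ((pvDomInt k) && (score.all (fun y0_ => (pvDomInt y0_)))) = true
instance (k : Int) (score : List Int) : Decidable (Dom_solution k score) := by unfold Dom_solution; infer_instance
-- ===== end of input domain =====

-- B replaces A's size-k min-heap (heapq push/pop) by one sorted list of all scores kept with
-- bisect.insort, reading the answer as an order statistic (s[0] while i < k, else s[-k]).

-- ===== PORT A =====
-- heapq._siftdown(heap, startpos, pos): bubble the hole at pos up while newitem < parent;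
-- returns the shifted list and the final hole position (newitem is written there by the caller,
-- exactly as CPython's _siftdown writes heap[pos] = newitem at the end).
def pvSiftDownLoop (heap : List Int) (startpos pos : Nat) (newitem : Int) : List Int × Nat :=
  if _h : startpos < pos then
    let parentpos := (pos - 1) / 2
    let parent := heap.getD parentpos 0
    if newitem < parent then
      pvSiftDownLoop (heap.set pos parent) startpos parentpos newitem
    else (heap, pos)
  else (heap, pos)
termination_by pos
decreasing_by exact Nat.lt_of_le_of_lt (Nat.div_le_self _ _) (by omega)

def pvSiftDown (heap : List Int) (startpos pos : Nat) : List Int :=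
  let newitem := heap.getD pos 0
  let r := pvSiftDownLoop heap startpos pos newitem
  r.1.set r.2 newitem

-- heapq.heappush: heap.append(item); _siftdown(heap, 0, len(heap)-1)
def pvHeappush (heap : List Int) (item : Int) : List Int :=
  pvSiftDown (heap ++ [item]) 0 heap.length

-- heapq._siftup's descent loop: move the smaller child up into the hole until the hole is a leaf
def pvSiftUpLoop (heap : List Int) (pos : Nat) : List Int × Nat :=
  if _h : 2*pos+1 < heap.length then
    let childpos := if 2*pos+2 < heap.length ∧ ¬ (heap.getD (2*pos+1) 0 < heap.getD (2*pos+2) 0)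
      then 2*pos+2 else 2*pos+1
    pvSiftUpLoop (heap.set pos (heap.getD childpos 0)) childpos
  else (heap, pos)
termination_by heap.length - pos
decreasing_by simp only [List.length_set]; split <;> omega

-- heapq._siftup(heap, pos): descend to a leaf, write newitem there, then _siftdown back up
def pvSiftUp (heap : List Int) (pos : Nat) : List Int :=
  let newitem := heap.getD pos 0
  let r := pvSiftUpLoop heap pos
  pvSiftDown (r.1.set r.2 newitem) pos r.2

-- heapq.heappop; on [] Python raises IndexError (never reached from `solution` under Pre_)
def pvHeappop (heap : List Int) : Int × List Int :=
  match heap.getLast? with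
  | none => (0, [])
  | some lastelt =>
    let h := heap.dropLast
    if h.isEmpty then (lastelt, h)
    else (h.getD 0 0, pvSiftUp (h.set 0 lastelt) 0)

-- min(q); on [] Python raises ValueError (never reached from `solution` under Pre_)
def pvMinQ (q : List Int) : Int := (PySem.List.min? q (fun y => y)).getD 0

def pvStepA (k : Int) (score : List Int) (st : List Int × List Int) (i : Int) : List Int × List Int :=
  if i < k then
    let q := pvHeappush st.2 (PySem.List.pyGetD score i 0)
    (st.1 ++ [pvMinQ q], q)
  else
    let q := if PySem.List.pyGetD st.2 0 0 < PySem.List.pyGetD score i 0 then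
        pvHeappush (pvHeappop st.2).2 (PySem.List.pyGetD score i 0)
      else st.2
    (st.1 ++ [pvMinQ q], q)

def solution (k : Int) (score : List Int) : List Int :=
  ((PySem.List.pyRange 0 (PySem.List.len score) 1).foldl (pvStepA k score) ([], [])).1

-- ===== PORT B =====
-- bisect.insort(s, x) = s.insert(bisect.bisect_right(s, x), x)
def pvStepB (k : Int) (st : List Int × List Int) (p : Int × Int) : List Int × List Int :=
  let s := PySem.List.insert st.2 ((PySem.List.bisectRight st.2 p.2 : Nat) : Int) p.2
  (st.1 ++ [if p.1 < k then PySem.List.pyGetD s 0 0 else PySem.List.pyGetD s (-k) 0], s)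

def solution_alt (k : Int) (score : List Int) : List Int :=
  ((PySem.List.enumerate score).foldl (pvStepB k) ([], [])).1

-- ===== PRECONDITION & SPEC =====
-- Pre_ excludes k ≤ 0 with a nonempty score: there A raises IndexError (q[0] on the empty heap).
def Pre_solution (k : Int) (score : List Int) : Prop := score = [] ∨ 1 ≤ k
instance (k : Int) (score : List Int) : Decidable (Pre_solution k score) := by
  unfold Pre_solution; infer_instance

def pvWitness_solution : Int × List Int := (3, [10, 100, 20, 150, 1, 100, 200])

def Spec_solution (k : Int) (score : List Int) (out : List Int) : Prop := out = solution_alt k score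
instance (k : Int) (score : List Int) (out : List Int) : Decidable (Spec_solution k score out) := by
  unfold Spec_solution; infer_instance

-- ===== CLAIM (what is proved, stated in full; the proofs are below) =====
def Claim_equal_solution : Prop := ∀ (k : Int) (score : List Int), Dom_solution k score → Pre_solution k score → Spec_solution k score (solution k score)

-- ===== LEMMAS AND PROOFS =====

-- the binary-heap order invariant used by heapq: every child dominates its parent
def HeapProp (l : List Int) : Prop :=
  ∀ j, 0 < j → j < l.length → l.getD ((j-1)/2) 0 ≤ l.getD j 0

-- heap invariant with a "hole" at pos: (A) the relation holds away from the hole,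
-- (B) the hole's children are dominated by the hole's parent
def HoleInv (l : List Int) (pos : Nat) : Prop :=
  (∀ j, 0 < j → j < l.length → j ≠ pos → (j-1)/2 ≠ pos → l.getD ((j-1)/2) 0 ≤ l.getD j 0) ∧
  (0 < pos → ∀ j, 0 < j → j < l.length → (j-1)/2 = pos → l.getD ((pos-1)/2) 0 ≤ l.getD j 0)

lemma getD_set_ne (l : List Int) (i j : Nat) (v : Int) (h : i ≠ j) :
    (l.set i v).getD j 0 = l.getD j 0 := by
  by_cases hj : j < l.length
  · rw [List.getD_eq_getElem _ _ (by simpa using hj), List.getD_eq_getElem _ _ hj,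
      List.getElem_set_ne h]
  · rw [List.getD_eq_default _ _ (by simpa using Nat.le_of_not_lt hj),
      List.getD_eq_default _ _ (Nat.le_of_not_lt hj)]

lemma getD_set_self (l : List Int) (i : Nat) (v : Int) (hi : i < l.length) :
    (l.set i v).getD i 0 = v := by
  rw [List.getD_eq_getElem _ _ (by simpa using hi)]
  simp

lemma getD_append_left (q : List Int) (x : Int) (j : Nat) (hj : j < q.length) :
    (q ++ [x]).getD j 0 = q.getD j 0 := by
  rw [List.getD_eq_getElem _ _ (by simp; omega), List.getD_eq_getElem _ _ hj]
  simp [hj]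

lemma count_set (l : List Int) (i : Nat) (hi : i < l.length) (v a : Int) :
    (l.set i v).count a + (if l.getD i 0 = a then 1 else 0)
      = l.count a + (if v = a then 1 else 0) := by
  have hdec : l = l.take i ++ l.getD i 0 :: l.drop (i+1) := by
    conv_lhs => rw [← List.take_append_drop i l]
    rw [List.drop_eq_getElem_cons hi, List.getD_eq_getElem _ _ hi]
  rw [List.set_eq_take_append_cons_drop, if_pos hi]
  conv_rhs => rw [show l.count a = (l.take i ++ l.getD i 0 :: l.drop (i+1)).count a from by
    rw [← hdec]]
  simp only [List.count_append, List.count_cons, beq_iff_eq]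
  split_ifs <;> omega

lemma ms_set_set (l : List Int) (i j : Nat) (v : Int) (hij : i ≠ j)
    (hi : i < l.length) (hj : j < l.length) :
    (((l.set i (l.getD j 0)).set j v : List Int) : Multiset Int) = ((l.set i v : List Int) : Multiset Int) := by
  rw [Multiset.coe_eq_coe, List.perm_iff_count]
  intro a
  have hw : (l.set i (l.getD j 0)).getD j 0 = l.getD j 0 := getD_set_ne _ _ _ _ hij
  have c1 := count_set l i hi (l.getD j 0) a
  have c2 := count_set (l.set i (l.getD j 0)) j (by simpa using hj) v a
  have c3 := count_set l i hi v a
  rw [hw] at c2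
  split_ifs at c1 c2 c3 <;> omega

lemma heap_root_le (l : List Int) (hh : HeapProp l) :
    ∀ j, j < l.length → l.getD 0 0 ≤ l.getD j 0 := by
  intro j
  induction j using Nat.strong_induction_on with
  | _ j ih =>
    intro hj
    rcases Nat.eq_zero_or_pos j with h0 | h0
    · subst h0; exact le_refl _
    · exact le_trans (ih ((j-1)/2) (by omega) (by omega)) (hh j h0 hj)

lemma pvMinQ_eq_root (q : List Int) (hh : HeapProp q) (hne : q ≠ []) :
    pvMinQ q = q.getD 0 0 := by
  obtain ⟨m, hm⟩ : ∃ m, PySem.List.min? q (fun y => y) = some m := by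
    cases h : PySem.List.min? q (fun y => y) with
    | none => exact absurd ((PySem.List.min?_eq_none_iff _ _).mp h) hne
    | some m => exact ⟨m, rfl⟩
  have hlen : 0 < q.length := List.length_pos_iff.mpr hne
  obtain ⟨jm, hjm, hjme⟩ := List.mem_iff_getElem.mp (PySem.List.min?_mem hm)
  have h1 : q.getD 0 0 ≤ m := by
    rw [← hjme, ← List.getD_eq_getElem q 0 hjm]
    exact heap_root_le q hh jm hjm
  have h2 : m ≤ q.getD 0 0 := by
    have : q.getD 0 0 ∈ q := by
      rw [List.getD_eq_getElem q 0 hlen]; exact List.getElem_mem hlen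
    exact PySem.List.min?_isMin hm _ this
  simp [pvMinQ, hm, le_antisymm h2 h1]

lemma pvMinQ_eq (q t : List Int) (hperm : q.Perm t) (hs : t.Pairwise (· ≤ ·)) (hne : q ≠ []) :
    pvMinQ q = t.getD 0 0 := by
  obtain ⟨m, hm⟩ : ∃ m, PySem.List.min? q (fun y => y) = some m := by
    cases h : PySem.List.min? q (fun y => y) with
    | none => exact absurd ((PySem.List.min?_eq_none_iff _ _).mp h) hne
    | some m => exact ⟨m, rfl⟩
  cases t with
  | nil => exact absurd (List.Perm.eq_nil hperm) hne
  | cons b t' =>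
    have hmem : m ∈ b :: t' := hperm.mem_iff.mp (PySem.List.min?_mem hm)
    have h1 : b ≤ m := by
      rcases List.mem_cons.mp hmem with h | h
      · omega
      · exact (List.pairwise_cons.mp hs).1 m h
    have h2 : m ≤ b := PySem.List.min?_isMin hm b (hperm.mem_iff.mpr (List.mem_cons_self))
    simp [pvMinQ, hm, le_antisymm h2 h1]

lemma siftDownLoop_step (l : List Int) (pos : Nat) (newitem : Int) (h0 : 0 < pos)
    (hlt : newitem < l.getD ((pos-1)/2) 0) :
    pvSiftDownLoop l 0 pos newitem
      = pvSiftDownLoop (l.set pos (l.getD ((pos-1)/2) 0)) 0 ((pos-1)/2) newitem := by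
  rw [pvSiftDownLoop]
  rw [dif_pos h0]
  simp only []
  rw [if_pos hlt]

lemma siftDownLoop_stop (l : List Int) (pos : Nat) (newitem : Int) (h0 : 0 < pos)
    (hge : ¬ newitem < l.getD ((pos-1)/2) 0) :
    pvSiftDownLoop l 0 pos newitem = (l, pos) := by
  rw [pvSiftDownLoop]
  rw [dif_pos h0]
  simp only []
  rw [if_neg hge]

lemma siftDownLoop_stop_zero (l : List Int) (newitem : Int) :
    pvSiftDownLoop l 0 0 newitem = (l, 0) := by
  rw [pvSiftDownLoop]
  rw [dif_neg (lt_irrefl 0)]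

lemma siftDownLoop_spec : ∀ (l : List Int) (pos : Nat) (newitem : Int),
    pos < l.length → HoleInv l pos →
    (∀ j, 0 < j → j < l.length → (j-1)/2 = pos → newitem ≤ l.getD j 0) →
    (pvSiftDownLoop l 0 pos newitem).1.length = l.length ∧
    (pvSiftDownLoop l 0 pos newitem).2 < l.length ∧
    HeapProp ((pvSiftDownLoop l 0 pos newitem).1.set (pvSiftDownLoop l 0 pos newitem).2 newitem) ∧
    ∀ v, (((pvSiftDownLoop l 0 pos newitem).1.set (pvSiftDownLoop l 0 pos newitem).2 v : List Int) : Multiset Int)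
          = ((l.set pos v : List Int) : Multiset Int) := by
  intro l pos newitem
  induction pos using Nat.strong_induction_on generalizing l with
  | _ pos ih =>
    intro hpos hinv hC
    by_cases h0 : 0 < pos
    · by_cases hlt : newitem < l.getD ((pos-1)/2) 0
      · rw [siftDownLoop_step l pos newitem h0 hlt]
        have hppos : (pos-1)/2 < pos := by omega
        have hlen2 : (l.set pos (l.getD ((pos-1)/2) 0)).length = l.length := by simp
        have hinv2 : HoleInv (l.set pos (l.getD ((pos-1)/2) 0)) ((pos-1)/2) := by
          constructor
          · intro j hj0 hjlen hjne hjpar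
            rw [hlen2] at hjlen
            by_cases hc : (j-1)/2 = pos
            · have hjnepos : j ≠ pos := by omega
              rw [hc, getD_set_self l pos _ hpos, getD_set_ne _ _ _ _ (Ne.symm hjnepos)]
              exact hinv.2 h0 j hj0 hjlen hc
            · by_cases hje : j = pos
              · exact absurd (by omega : (j-1)/2 = (pos-1)/2) hjpar
              · rw [getD_set_ne _ _ _ _ (Ne.symm hje), getD_set_ne _ _ _ _ (by omega : pos ≠ (j-1)/2)]
                exact hinv.1 j hj0 hjlen hje hc
          · intro hpp0 j hj0 hjlen hjpar
            rw [hlen2] at hjlen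
            rw [getD_set_ne _ _ _ _ (by omega : pos ≠ ((pos-1)/2-1)/2)]
            by_cases hje : j = pos
            · rw [hje, getD_set_self l pos _ hpos]
              exact hinv.1 ((pos-1)/2) hpp0 (by omega) (by omega) (by omega)
            · rw [getD_set_ne _ _ _ _ (Ne.symm hje)]
              have ha := hinv.1 ((pos-1)/2) hpp0 (by omega) (by omega) (by omega)
              have hb := hinv.1 j hj0 hjlen hje (by omega)
              rw [hjpar] at hb
              exact le_trans ha hb
        have hC2 : ∀ j, 0 < j → j < (l.set pos (l.getD ((pos-1)/2) 0)).length →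
            (j-1)/2 = (pos-1)/2 → newitem ≤ (l.set pos (l.getD ((pos-1)/2) 0)).getD j 0 := by
          intro j hj0 hjlen hjpar
          rw [hlen2] at hjlen
          by_cases hje : j = pos
          · rw [hje, getD_set_self l pos _ hpos]
            exact le_of_lt hlt
          · rw [getD_set_ne _ _ _ _ (Ne.symm hje)]
            have h1 := hinv.1 j hj0 hjlen hje (by omega)
            rw [hjpar] at h1
            exact le_trans (le_of_lt hlt) h1
        obtain ⟨e1, e2, e3, e4⟩ := ih ((pos-1)/2) hppos (l.set pos (l.getD ((pos-1)/2) 0))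
          (by rw [hlen2]; omega) hinv2 hC2
        refine ⟨by rw [e1, hlen2], by rw [hlen2] at e2; exact e2, e3, ?_⟩
        intro v
        rw [e4 v]
        exact ms_set_set l pos ((pos-1)/2) v (by omega) hpos (by omega)
      · rw [siftDownLoop_stop l pos newitem h0 hlt]
        refine ⟨rfl, hpos, ?_, fun v => rfl⟩
        intro j hj0 hjlen
        rw [List.length_set] at hjlen
        by_cases hje : j = pos
        · rw [hje, getD_set_ne _ _ _ _ (by omega : pos ≠ (pos-1)/2),
            getD_set_self l pos newitem hpos]
          exact not_lt.mp hlt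
        · by_cases hc : (j-1)/2 = pos
          · rw [hc, getD_set_self l pos newitem hpos, getD_set_ne _ _ _ _ (Ne.symm hje)]
            exact hC j hj0 hjlen hc
          · rw [getD_set_ne _ _ _ _ (Ne.symm hje), getD_set_ne _ _ _ _ (by omega : pos ≠ (j-1)/2)]
            exact hinv.1 j hj0 hjlen hje hc
    · have hz : pos = 0 := by omega
      subst hz
      rw [siftDownLoop_stop_zero]
      refine ⟨rfl, hpos, ?_, fun v => rfl⟩
      intro j hj0 hjlen
      rw [List.length_set] at hjlen
      by_cases hc : (j-1)/2 = 0
      · rw [hc, getD_set_self l 0 newitem hpos, getD_set_ne _ _ _ _ (by omega : (0:Nat) ≠ j)]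
        exact hC j hj0 hjlen hc
      · rw [getD_set_ne _ _ _ _ (by omega : (0:Nat) ≠ j),
          getD_set_ne _ _ _ _ (by omega : (0:Nat) ≠ (j-1)/2)]
        exact hinv.1 j hj0 hjlen (by omega) hc

lemma siftUpLoop_step (l : List Int) (pos : Nat) (h : 2*pos+1 < l.length) :
    pvSiftUpLoop l pos = pvSiftUpLoop
      (l.set pos (l.getD (if 2*pos+2 < l.length ∧ ¬ (l.getD (2*pos+1) 0 < l.getD (2*pos+2) 0)
        then 2*pos+2 else 2*pos+1) 0))
      (if 2*pos+2 < l.length ∧ ¬ (l.getD (2*pos+1) 0 < l.getD (2*pos+2) 0)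
        then 2*pos+2 else 2*pos+1) := by
  rw [pvSiftUpLoop]
  simp [h]

lemma siftUpLoop_stop (l : List Int) (pos : Nat) (h : ¬ 2*pos+1 < l.length) :
    pvSiftUpLoop l pos = (l, pos) := by
  rw [pvSiftUpLoop]
  simp [h]

lemma siftUpLoop_spec : ∀ (l : List Int) (pos : Nat),
    pos < l.length → HoleInv l pos →
    (pvSiftUpLoop l pos).1.length = l.length ∧
    (pvSiftUpLoop l pos).2 < l.length ∧
    l.length ≤ 2 * (pvSiftUpLoop l pos).2 + 1 ∧
    HoleInv (pvSiftUpLoop l pos).1 (pvSiftUpLoop l pos).2 ∧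
    ∀ v, (((pvSiftUpLoop l pos).1.set (pvSiftUpLoop l pos).2 v : List Int) : Multiset Int)
          = ((l.set pos v : List Int) : Multiset Int) := by
  intro l pos
  generalize hfuel : l.length - pos = fuel
  induction fuel using Nat.strong_induction_on generalizing l pos with
  | _ fuel ih =>
    intro hpos hinv
    by_cases h : 2*pos+1 < l.length
    · rw [siftUpLoop_step l pos h]
      set C := (if 2*pos+2 < l.length ∧ ¬ (l.getD (2*pos+1) 0 < l.getD (2*pos+2) 0)
        then 2*pos+2 else 2*pos+1) with hCdef
      have hc1 : pos < C ∧ C < l.length ∧ (C-1)/2 = pos := by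
        rw [hCdef]; split_ifs with hch
        · exact ⟨by omega, hch.1, by omega⟩
        · exact ⟨by omega, h, by omega⟩
      have hc2 : ∀ j, (j-1)/2 = pos → 0 < j → j < l.length → l.getD C 0 ≤ l.getD j 0 := by
        intro j hj hj0 hjlen
        have hj' : j = 2*pos+1 ∨ j = 2*pos+2 := by omega
        rw [hCdef]; split_ifs with hch
        · rcases hj' with hje | hje <;> subst hje
          · exact not_lt.mp hch.2
          · exact le_refl _
        · rcases hj' with hje | hje <;> subst hje
          · exact le_refl _
          · rcases (not_and_or.mp hch) with hbad | hbad
            · omega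
            · exact le_of_lt (not_not.mp hbad)
      have hlen2 : (l.set pos (l.getD C 0)).length = l.length := by simp
      have hinv2 : HoleInv (l.set pos (l.getD C 0)) C := by
        constructor
        · intro j hj0 hjlen hjne hjpar
          rw [hlen2] at hjlen
          by_cases hje : j = pos
          · subst hje
            rw [getD_set_self l j _ hpos, getD_set_ne _ _ _ _ (by omega : j ≠ (j-1)/2)]
            exact hinv.2 hj0 C (by omega) (by omega) (by omega)
          · by_cases hjp : (j-1)/2 = pos
            · rw [hjp, getD_set_self l pos _ hpos, getD_set_ne _ _ _ _ (Ne.symm hje)]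
              exact hc2 j hjp hj0 hjlen
            · rw [getD_set_ne _ _ _ _ (Ne.symm hje), getD_set_ne _ _ _ _ (by omega : pos ≠ (j-1)/2)]
              exact hinv.1 j hj0 hjlen hje hjp
        · intro hC0 j hj0 hjlen hjpar
          rw [hlen2] at hjlen
          rw [hc1.2.2, getD_set_self l pos _ hpos, getD_set_ne _ _ _ _ (by omega : pos ≠ j)]
          have h1 := hinv.1 j hj0 hjlen (by omega) (by omega)
          rw [hjpar] at h1
          exact h1
      obtain ⟨e1, e2, e3, e4, e5⟩ := ih ((l.set pos (l.getD C 0)).length - C)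
        (by rw [hlen2]; omega) (l.set pos (l.getD C 0)) C rfl (by rw [hlen2]; omega) hinv2
      refine ⟨by rw [e1, hlen2], by rw [hlen2] at e2; exact e2,
        by rw [hlen2] at e3; exact e3, e4, ?_⟩
      intro v
      rw [e5 v]
      exact ms_set_set l pos C v (by omega) hpos (by omega)
    · rw [siftUpLoop_stop l pos h]
      exact ⟨rfl, hpos, by omega, hinv, fun v => rfl⟩

lemma holeInv_set_pos (l : List Int) (pos : Nat) (v : Int) (h : HoleInv l pos) :
    HoleInv (l.set pos v) pos := by
  constructor
  · intro j hj0 hjlen hjne hjpar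
    rw [List.length_set] at hjlen
    rw [getD_set_ne _ _ _ _ (Ne.symm hjne), getD_set_ne _ _ _ _ (Ne.symm hjpar)]
    exact h.1 j hj0 hjlen hjne hjpar
  · intro hp0 j hj0 hjlen hjpar
    rw [List.length_set] at hjlen
    rw [getD_set_ne _ _ _ _ (by omega : pos ≠ j), getD_set_ne _ _ _ _ (by omega : pos ≠ (pos-1)/2)]
    exact h.2 hp0 j hj0 hjlen hjpar

lemma heappush_spec (q : List Int) (x : Int) (hh : HeapProp q) :
    HeapProp (pvHeappush q x) ∧ ((pvHeappush q x : List Int) : Multiset Int) = x ::ₘ (q : Multiset Int) := by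
  have hget : (q ++ [x]).getD q.length 0 = x := by
    rw [List.getD_eq_getElem _ _ (by simp)]
    exact List.getElem_concat_length rfl _
  have hdef : pvHeappush q x = ((pvSiftDownLoop (q ++ [x]) 0 q.length x).1.set
      (pvSiftDownLoop (q ++ [x]) 0 q.length x).2 x) := by
    simp only [pvHeappush, pvSiftDown]
    rw [hget]
  have hinv : HoleInv (q ++ [x]) q.length := by
    constructor
    · intro j hj0 hjlen hjne hjpar
      rw [List.length_append, List.length_cons, List.length_nil] at hjlen
      have hj : j < q.length := by omega
      rw [getD_append_left _ _ _ hj, getD_append_left _ _ _ (by omega)]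
      exact hh j hj0 hj
    · intro h0 j hj0 hjlen hjpar
      rw [List.length_append, List.length_cons, List.length_nil] at hjlen
      omega
  have hC : ∀ j, 0 < j → j < (q ++ [x]).length → (j-1)/2 = q.length → x ≤ (q ++ [x]).getD j 0 := by
    intro j hj0 hjlen hjpar
    rw [List.length_append, List.length_cons, List.length_nil] at hjlen
    omega
  obtain ⟨e1, e2, e3, e4⟩ := siftDownLoop_spec (q ++ [x]) q.length x (by simp) hinv hC
  rw [hdef]
  refine ⟨e3, ?_⟩
  rw [e4 x, show (q ++ [x]).set q.length x = q ++ [x] from by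
    rw [List.set_eq_take_append_cons_drop, if_pos (by simp), List.take_left,
      List.drop_eq_nil_of_le (by simp)],
    Multiset.cons_coe, Multiset.coe_eq_coe]
  exact List.perm_append_singleton x q

lemma heappop_spec (q : List Int) (hh : HeapProp q) (hne : q ≠ []) :
    (pvHeappop q).1 = q.getD 0 0 ∧ HeapProp (pvHeappop q).2 ∧
    (q : Multiset Int) = q.getD 0 0 ::ₘ ((pvHeappop q).2 : Multiset Int) := by
  obtain ⟨last, hlast⟩ : ∃ a, q.getLast? = some a := by
    cases hq : q.getLast? with
    | none => exact absurd (List.getLast?_eq_none_iff.mp hq) hne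
    | some a => exact ⟨a, rfl⟩
  have hgl : q.getLast hne = last :=
    Option.some.inj ((List.getLast?_eq_some_getLast hne).symm.trans hlast)
  have hqdec : q = q.dropLast ++ [last] := by
    conv_lhs => rw [← List.dropLast_concat_getLast hne]
    rw [hgl]
  by_cases hemp : q.dropLast.isEmpty = true
  · have hdl : q.dropLast = [] := List.isEmpty_iff.mp hemp
    have hq1 : q = [last] := by rw [hqdec, hdl]; rfl
    have hres : pvHeappop q = (last, []) := by
      simp only [pvHeappop]
      rw [hlast]
      show (if q.dropLast.isEmpty = true then (last, q.dropLast)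
        else (q.dropLast.getD 0 0, pvSiftUp (q.dropLast.set 0 last) 0)) = (last, [])
      rw [if_pos hemp, hdl]
    rw [hres]
    refine ⟨by rw [hq1]; rfl, by intro j hj0 hjlen; simp at hjlen, ?_⟩
    rw [hq1]
    rfl
  · have hdlne : q.dropLast ≠ [] := fun h => hemp (List.isEmpty_iff.mpr h)
    have hlen1 : 0 < q.dropLast.length := List.length_pos_iff.mpr hdlne
    have hdefpop : pvHeappop q
        = (q.dropLast.getD 0 0, pvSiftUp (q.dropLast.set 0 last) 0) := by
      simp only [pvHeappop]
      rw [hlast]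
      show (if q.dropLast.isEmpty = true then (last, q.dropLast)
        else (q.dropLast.getD 0 0, pvSiftUp (q.dropLast.set 0 last) 0))
        = (q.dropLast.getD 0 0, pvSiftUp (q.dropLast.set 0 last) 0)
      rw [if_neg hemp]
    set h2 := q.dropLast.set 0 last with hh2
    have hlen2 : h2.length = q.dropLast.length := by rw [hh2, List.length_set]
    have hgetq : ∀ j, j < q.dropLast.length → q.dropLast.getD j 0 = q.getD j 0 := by
      intro j hj
      conv_rhs => rw [hqdec]
      rw [getD_append_left _ _ _ hj]
    have hget0 : h2.getD 0 0 = last := getD_set_self _ 0 _ hlen1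
    have hinv2 : HoleInv h2 0 := by
      constructor
      · intro j hj0 hjlen hjne hjpar
        rw [hlen2] at hjlen
        rw [hh2, getD_set_ne _ _ _ _ (by omega : 0 ≠ j),
          getD_set_ne _ _ _ _ (by omega : 0 ≠ (j-1)/2),
          hgetq j hjlen, hgetq ((j-1)/2) (by omega)]
        exact hh j hj0 (by rw [hqdec, List.length_append, List.length_cons, List.length_nil]; omega)
      · intro h0
        omega
    obtain ⟨u1, u2, u3, u4, u5⟩ := siftUpLoop_spec h2 0 (by omega) hinv2
    have hdefsu : pvSiftUp h2 0
        = pvSiftDown ((pvSiftUpLoop h2 0).1.set (pvSiftUpLoop h2 0).2 last) 0 (pvSiftUpLoop h2 0).2 := by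
      simp only [pvSiftUp]
      rw [hget0]
    set l3 := (pvSiftUpLoop h2 0).1.set (pvSiftUpLoop h2 0).2 last with hl3
    have hl3len : l3.length = h2.length := by rw [hl3, List.length_set, u1]
    have hl3get : l3.getD (pvSiftUpLoop h2 0).2 0 = last := getD_set_self _ _ _ (by rw [u1]; exact u2)
    have hdefsd : pvSiftDown l3 0 (pvSiftUpLoop h2 0).2
        = ((pvSiftDownLoop l3 0 (pvSiftUpLoop h2 0).2 last).1.set
           (pvSiftDownLoop l3 0 (pvSiftUpLoop h2 0).2 last).2 last) := by
      simp only [pvSiftDown]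
      rw [hl3get]
    have hinv3 : HoleInv l3 (pvSiftUpLoop h2 0).2 := holeInv_set_pos _ _ _ u4
    have hC3 : ∀ j, 0 < j → j < l3.length → (j-1)/2 = (pvSiftUpLoop h2 0).2 →
        last ≤ l3.getD j 0 := by
      intro j hj0 hjlen hjpar
      rw [hl3len] at hjlen
      omega
    obtain ⟨d1, d2, d3, d4⟩ := siftDownLoop_spec l3 (pvSiftUpLoop h2 0).2 last
      (by rw [hl3len]; exact u2) hinv3 hC3
    rw [hdefpop]
    have hfirst : q.dropLast.getD 0 0 = q.getD 0 0 := hgetq 0 hlen1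
    refine ⟨hfirst, ?_, ?_⟩
    · show HeapProp (pvSiftUp h2 0)
      rw [hdefsu, hdefsd]
      exact d3
    · show (q : Multiset Int) = q.getD 0 0 ::ₘ ((pvSiftUp h2 0 : List Int) : Multiset Int)
      rw [hdefsu, hdefsd, d4 last, show l3.set (pvSiftUpLoop h2 0).2 last = l3 from by
        rw [hl3, List.set_set], u5 last, show h2.set 0 last = h2 from by rw [hh2, List.set_set]]
      obtain ⟨a, t, hat⟩ : ∃ a t, q.dropLast = a :: t := by
        cases hq : q.dropLast with
        | nil => exact absurd hq hdlne
        | cons a t => exact ⟨a, t, rfl⟩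
      have hq0 : q.getD 0 0 = a := by
        rw [← hfirst, hat]
        rfl
      have hh2at : h2 = last :: t := by rw [hh2, hat]; rfl
      rw [hq0, hh2at]
      conv_lhs => rw [hqdec, hat]
      rw [show (a :: t) ++ [last] = a :: (t ++ [last]) from rfl, ← Multiset.cons_coe,
        ← Multiset.cons_coe, Multiset.cons_inj_right, Multiset.cons_coe, Multiset.coe_eq_coe]
      exact List.perm_append_singleton last t

-- sorted(pre) in proofs
def S (pre : List Int) : List Int := PySem.List.sorted pre (fun y => y)

lemma S_pairwise (pre : List Int) : (S pre).Pairwise (· ≤ ·) := by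
  simpa using PySem.List.sorted_pairwise pre (fun y => y)

lemma S_perm (pre : List Int) : (S pre).Perm pre :=
  PySem.List.sorted_perm pre (fun y => y) false

lemma S_length (pre : List Int) : (S pre).length = pre.length :=
  (S_perm pre).length_eq

lemma insert_natCast (s : List Int) (p : Nat) (hp : p ≤ s.length) (v : Int) :
    PySem.List.insert s (p : Int) v = s.take p ++ v :: s.drop p := by
  simp only [PySem.List.insert, PySem.List.sliceIndices]
  rw [if_neg (by omega),
    show (if (1:Int) < 0 then (s.length:Int) - 1 else (s.length:Int)) = (s.length:Int) from
      if_neg (by norm_num),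
    show (min (p : Int) (s.length : Int)).toNat = p from by omega]

lemma S_snoc (pre : List Int) (x : Int) :
    S (pre ++ [x]) = (S pre).take (PySem.List.bisectRight (S pre) x) ++
      x :: (S pre).drop (PySem.List.bisectRight (S pre) x) := by
  obtain ⟨hp, hle, hgt⟩ := PySem.List.bisectRight_spec (S pre) x (S_pairwise pre)
  apply PySem.List.sorted_id_eq_of_perm_of_pairwise
  · refine List.perm_middle.trans ?_
    rw [List.take_append_drop]
    exact ((S_perm pre).cons x).trans (List.perm_append_singleton x pre).symm
  · rw [List.pairwise_append]
    refine ⟨(S_pairwise pre).sublist (List.take_sublist _ _), ?_, ?_⟩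
    · rw [List.pairwise_cons]
      refine ⟨?_, (S_pairwise pre).sublist (List.drop_sublist _ _)⟩
      intro b hb
      obtain ⟨j, hj, hbe⟩ := List.mem_drop_iff_getElem.mp hb
      exact le_of_lt (hbe ▸ hgt _ (by omega) (by omega))
    · intro a ha b hb
      obtain ⟨j, hj, hae⟩ := List.mem_take_iff_getElem.mp ha
      have hax : a ≤ x := hae ▸ hle _ (by omega) (by omega)
      rcases List.mem_cons.mp hb with h | h
      · omega
      · obtain ⟨j2, hj2, hbe⟩ := List.mem_drop_iff_getElem.mp h
        exact le_trans hax (le_of_lt (hbe ▸ hgt _ (by omega) (by omega)))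

lemma drop_insort_le (s : List Int) (x : Int) (p j : Nat) (hp : p ≤ s.length) (hj : j ≤ p) :
    (((s.take p ++ x :: s.drop p).drop j : List Int) : Multiset Int) = x ::ₘ ((s.drop j : List Int) : Multiset Int) := by
  rw [List.drop_append_of_le_length (by simp; omega)]
  rw [Multiset.cons_coe, Multiset.coe_eq_coe]
  refine List.perm_middle.trans ?_
  apply List.Perm.cons
  rw [List.drop_take, show s.drop p = (s.drop j).drop (p - j) from by
    rw [List.drop_drop]; congr 1; omega, List.take_append_drop]

lemma drop_insort_ge (s : List Int) (x : Int) (p j : Nat) (hp : p ≤ s.length) (hpj : p ≤ j) :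
    (s.take p ++ x :: s.drop p).drop (j+1) = s.drop j := by
  have h0 : s.take p ++ x :: s.drop p = (s.take p ++ [x]) ++ s.drop p := by simp
  have hlen : (s.take p ++ [x]).length = p + 1 := by simp; omega
  rw [h0, show j + 1 = (p + 1) + (j - p) from by omega, ← List.drop_drop,
    show p + 1 = (s.take p ++ [x]).length from hlen.symm, List.drop_left,
    List.drop_drop, show p + (j - p) = j from by omega]

-- the joint loop invariant: after m steps the answers agree, B's list is sorted(prefix),
-- A's heap is a heap whose multiset is the top-min(m,k) block of B's list
lemma main_inv (k : Int) (hk : 1 ≤ k) (score : List Int) :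
    ∀ m, m ≤ score.length →
    (((List.range m).map (fun (j : Nat) => (j : Int))).foldl (pvStepA k score) ([], [])).1
      = ((PySem.List.enumerate (score.take m)).foldl (pvStepB k) ([], [])).1 ∧
    ((PySem.List.enumerate (score.take m)).foldl (pvStepB k) ([], [])).2 = S (score.take m) ∧
    HeapProp ((((List.range m).map (fun (j : Nat) => (j : Int))).foldl (pvStepA k score) ([], [])).2) ∧
    (((((List.range m).map (fun (j : Nat) => (j : Int))).foldl (pvStepA k score) ([], [])).2 : List Int) : Multiset Int)
      = (((S (score.take m)).drop (m - k.toNat) : List Int) : Multiset Int) := by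
  intro m
  induction m with
  | zero =>
    intro _
    refine ⟨rfl, ?_, ?_, ?_⟩
    · exact ((PySem.List.sorted_eq_nil_iff _ _ _).mpr rfl).symm
    · intro j hj0 hjlen
      simp at hjlen
    · have hS0 : S ([] : List Int) = [] := (PySem.List.sorted_eq_nil_iff _ _ _).mpr rfl
      simp [hS0]
  | succ m ihm =>
    intro hm1
    have hmlt : m < score.length := hm1
    have hm : m ≤ score.length := by omega
    obtain ⟨ih1, ih2, ih3, ih4⟩ := ihm hm
    have hkK : k = (k.toNat : Int) := (Int.toNat_of_nonneg (by omega)).symm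
    have hKpos : 1 ≤ k.toNat := by omega
    have hx : score.take (m+1) = score.take m ++ [score[m]] := by
      rw [List.take_add_one, List.getElem?_eq_getElem hmlt]
      rfl
    have hrange : (List.range (m+1)).map (fun (j : Nat) => (j : Int))
        = (List.range m).map (fun (j : Nat) => (j : Int)) ++ [(m:Int)] := by
      rw [List.range_succ, List.map_append]
      rfl
    have htakelen : (score.take m).length = m := by
      rw [List.length_take]
      omega
    have henum : PySem.List.enumerate (score.take (m+1))
        = PySem.List.enumerate (score.take m) ++ [((m:Int), score[m])] := by
      rw [hx, PySem.List.enumerate_append, htakelen]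
      simp [PySem.List.enumerate_cons]
    rw [hrange, henum, List.foldl_append, List.foldl_append]
    simp only [List.foldl_cons, List.foldl_nil]
    set stA := ((List.range m).map (fun (j : Nat) => (j : Int))).foldl (pvStepA k score) ([], []) with hstAdef
    set stB := (PySem.List.enumerate (score.take m)).foldl (pvStepB k) ([], []) with hstBdef
    set s := S (score.take m) with hsdef
    have hslen : s.length = m := by rw [hsdef, S_length, htakelen]
    obtain ⟨hple, hlow, hhigh⟩ := PySem.List.bisectRight_spec s score[m] (S_pairwise _)
    set p := PySem.List.bisectRight s score[m] with hpdef
    set s' := s.take p ++ score[m] :: s.drop p with hs'def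
    have hs' : S (score.take (m+1)) = s' := by
      rw [hx]
      exact S_snoc (score.take m) score[m]
    have hs'pw : s'.Pairwise (· ≤ ·) := by
      rw [← hs']
      exact S_pairwise _
    have hs'len : s'.length = m + 1 := by
      rw [hs'def]
      simp
      omega
    have hBstep : pvStepB k stB ((m:Int), score[m])
        = (stB.1 ++ [if (m:Int) < k then PySem.List.pyGetD s' 0 0
            else PySem.List.pyGetD s' (-k) 0], s') := by
      simp only [pvStepB]
      rw [ih2, ← hpdef, insert_natCast s p hple]
    have hgetscore : PySem.List.pyGetD score (m:Int) 0 = score[m] := by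
      rw [PySem.List.pyGetD_natCast]
      exact List.getD_eq_getElem _ _ hmlt
    by_cases hcase : (m:Int) < k
    · have hmK0 : m - k.toNat = 0 := by omega
      have hm1K : m + 1 - k.toNat = 0 := by omega
      have hAstep : pvStepA k score stA (m:Int)
          = (stA.1 ++ [pvMinQ (pvHeappush stA.2 score[m])], pvHeappush stA.2 score[m]) := by
        simp only [pvStepA]
        rw [if_pos hcase, hgetscore]
      obtain ⟨hp1, hp2⟩ := heappush_spec stA.2 score[m] ih3
      have hms : ((pvHeappush stA.2 score[m] : List Int) : Multiset Int)
          = ((s' : List Int) : Multiset Int) := by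
        rw [hp2, ih4, hmK0, List.drop_zero, Multiset.cons_coe, Multiset.coe_eq_coe, hs'def]
        conv_lhs => rw [show s = s.take p ++ s.drop p from (List.take_append_drop p s).symm]
        exact List.perm_middle.symm
      have hqlen' : (pvHeappush stA.2 score[m]).length = m + 1 := by
        rw [List.Perm.length_eq (Multiset.coe_eq_coe.mp hms), hs'len]
      have hqne : pvHeappush stA.2 score[m] ≠ [] := by
        intro h
        rw [h] at hqlen'
        simp at hqlen'
      have hminval : pvMinQ (pvHeappush stA.2 score[m]) = s'.getD 0 0 :=
        pvMinQ_eq _ _ (Multiset.coe_eq_coe.mp hms) hs'pw hqne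
      refine ⟨?_, ?_, ?_, ?_⟩
      · rw [hAstep, hBstep, ih1, if_pos hcase, hminval, PySem.List.pyGetD_zero]
      · rw [hBstep]
        exact hs'.symm
      · rw [hAstep]
        exact hp1
      · rw [hAstep]
        show ((pvHeappush stA.2 score[m] : List Int) : Multiset Int) = _
        rw [hs', hm1K, List.drop_zero]
        exact hms
    · have hKm : k.toNat ≤ m := by omega
      have hmKs : m - k.toNat < s.length := by omega
      have hqlen : stA.2.length = k.toNat := by
        rw [List.Perm.length_eq (Multiset.coe_eq_coe.mp ih4), List.length_drop, hslen]
        omega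
      have hqne : stA.2 ≠ [] := by
        intro h
        rw [h] at hqlen
        simp at hqlen
        omega
      have hdroppw : (s.drop (m - k.toNat)).Pairwise (· ≤ ·) :=
        List.Pairwise.sublist (List.drop_sublist _ _) (S_pairwise _)
      have hperm : stA.2.Perm (s.drop (m - k.toNat)) := Multiset.coe_eq_coe.mp ih4
      have hroot : stA.2.getD 0 0 = s[m - k.toNat] := by
        rw [← pvMinQ_eq_root stA.2 ih3 hqne, pvMinQ_eq stA.2 _ hperm hdroppw hqne,
          List.getD_eq_getElem _ _ (by rw [List.length_drop]; omega), List.getElem_drop]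
        simp
      have hAstep : pvStepA k score stA (m:Int)
          = (stA.1 ++ [pvMinQ (if s[m - k.toNat] < score[m]
              then pvHeappush (pvHeappop stA.2).2 score[m] else stA.2)],
             if s[m - k.toNat] < score[m]
              then pvHeappush (pvHeappop stA.2).2 score[m] else stA.2) := by
        simp only [pvStepA]
        rw [if_neg hcase, hgetscore, PySem.List.pyGetD_zero, hroot]
      set q' := (if s[m - k.toNat] < score[m]
          then pvHeappush (pvHeappop stA.2).2 score[m] else stA.2) with hq'def
      have hkey : ((q' : List Int) : Multiset Int)
            = ((s'.drop (m + 1 - k.toNat) : List Int) : Multiset Int) ∧ HeapProp q' := by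
        by_cases hbr : s[m - k.toNat] < score[m]
        · obtain ⟨o1, o2, o3⟩ := heappop_spec stA.2 ih3 hqne
          obtain ⟨pp1, pp2⟩ := heappush_spec (pvHeappop stA.2).2 score[m] o2
          have hpge : m - k.toNat + 1 ≤ p := by
            by_contra hcon
            have := hhigh (m - k.toNat) hmKs (by omega)
            omega
          have hpop : (((pvHeappop stA.2).2 : List Int) : Multiset Int)
              = ((s.drop (m - k.toNat + 1) : List Int) : Multiset Int) := by
            have h1 := o3
            rw [hroot, ih4, List.drop_eq_getElem_cons hmKs, ← Multiset.cons_coe] at h1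
            exact ((Multiset.cons_inj_right _).mp h1).symm
          constructor
          · rw [hq'def, if_pos hbr, pp2, hpop, hs'def,
              drop_insort_le s score[m] p (m + 1 - k.toNat) hple (by omega),
              show m + 1 - k.toNat = m - k.toNat + 1 from by omega]
          · rw [hq'def, if_pos hbr]
            exact pp1
        · constructor
          · by_cases hpp : p ≤ m - k.toNat
            · rw [hq'def, if_neg hbr, ih4, hs'def,
                show m + 1 - k.toNat = (m - k.toNat) + 1 from by omega,
                drop_insort_ge s score[m] p (m - k.toNat) hple hpp]
            · have hxeq : score[m] = s[m - k.toNat] := by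
                have := hlow (m - k.toNat) hmKs (by omega)
                omega
              rw [hq'def, if_neg hbr, ih4, hs'def,
                drop_insort_le s score[m] p (m + 1 - k.toNat) hple (by omega),
                List.drop_eq_getElem_cons hmKs, ← Multiset.cons_coe,
                show m - k.toNat + 1 = m + 1 - k.toNat from by omega, hxeq]
          · rw [hq'def, if_neg hbr]
            exact ih3
      have hq'len : q'.length = k.toNat := by
        rw [List.Perm.length_eq (Multiset.coe_eq_coe.mp hkey.1), List.length_drop, hs'len]
        omega
      have hq'ne : q' ≠ [] := by
        intro h
        rw [h] at hq'len
        simp at hq'len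
        omega
      have hdrop'pw : (s'.drop (m + 1 - k.toNat)).Pairwise (· ≤ ·) :=
        List.Pairwise.sublist (List.drop_sublist _ _) hs'pw
      have hminval : pvMinQ q' = (s'.drop (m + 1 - k.toNat)).getD 0 0 :=
        pvMinQ_eq _ _ (Multiset.coe_eq_coe.mp hkey.1) hdrop'pw hq'ne
      have hidx : (s'.drop (m + 1 - k.toNat)).getD 0 0 = s'.getD (m + 1 - k.toNat) 0 := by
        rw [List.getD_eq_getElem _ _ (by rw [List.length_drop, hs'len]; omega),
          List.getD_eq_getElem _ _ (by rw [hs'len]; omega), List.getElem_drop]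
        simp
      have hBval : PySem.List.pyGetD s' (-k) 0 = s'.getD (m + 1 - k.toNat) 0 := by
        rw [show -k = -((k.toNat : Nat) : Int) from by omega,
          PySem.List.pyGetD_neg_natCast s' k.toNat 0 (by omega) (by rw [hs'len]; omega),
          List.getD_eq_getElem _ _ (by rw [hs'len]; omega)]
        have hidx2 : s'.length - k.toNat = m + 1 - k.toNat := by rw [hs'len]
        simp only [hidx2]
      refine ⟨?_, ?_, ?_, ?_⟩
      · rw [hAstep, hBstep, ih1, if_neg hcase, hminval, hidx, hBval]
      · rw [hBstep]
        exact hs'.symm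
      · rw [hAstep]
        exact hkey.2
      · rw [hAstep]
        show ((q' : List Int) : Multiset Int) = _
        rw [hs']
        exact hkey.1

-- ===== VERDICT (by name: the statement is the Claim_ definition above) =====
theorem solution_spec : Claim_equal_solution := by
  unfold Claim_equal_solution
  intro k score _hdom hpre
  unfold Spec_solution
  rcases hpre with hnil | hk
  · subst hnil
    rfl
  · obtain ⟨h1, _, _, _⟩ := main_inv k hk score score.length (le_refl _)
    rw [List.take_length] at h1
    show solution k score = solution_alt k score
    unfold solution solution_alt
    rw [PySem.List.len_eq, PySem.List.pyRange_zero_natCast]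
    exact h1
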